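-- pv_equiv track=rewrite | github.com/sibirica/multiscale-attention | tests_by_gpt/check_generate_steps.py | compute_block_lengths
-- ===== SOURCE A (Python) =====
-- def compute_block_lengths(input_len: int, output_len: int, rate: int) -> list[int]:
--     remaining = output_len
--     cur_len = input_len
--     step_len = (-cur_len) % rate
--     if step_len == 0:
--         step_len = rate
--     blocks = []
--     while remaining > 0:
--         block_len = min(step_len, remaining)
--         blocks.append(block_len)
--         cur_len += block_len
--         remaining -= block_len
--         step_len = rate
--     return blocks
-- ===== SOURCE B (Python) =====
-- def compute_block_lengths(input_len: int, output_len: int, rate: int) -> list[int]: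
--     if output_len <= 0:
--         return []
--     first = (-input_len) % rate or rate
--     if first >= output_len:
--         return [output_len]
--     full, rem = divmod(output_len - first, rate)
--     return [first] + [rate] * full + ([rem] if rem else [])
-- ===== Notes on version B (the rewrite author's own statement) =====
-- stated objective: simpler
-- what changed: Replaces the accumulating while-loop with direct arithmetic: the first aligned block via (-input_len)%rate or rate, then divmod counts the full blocks and the remainder.
import Mathlib
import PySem

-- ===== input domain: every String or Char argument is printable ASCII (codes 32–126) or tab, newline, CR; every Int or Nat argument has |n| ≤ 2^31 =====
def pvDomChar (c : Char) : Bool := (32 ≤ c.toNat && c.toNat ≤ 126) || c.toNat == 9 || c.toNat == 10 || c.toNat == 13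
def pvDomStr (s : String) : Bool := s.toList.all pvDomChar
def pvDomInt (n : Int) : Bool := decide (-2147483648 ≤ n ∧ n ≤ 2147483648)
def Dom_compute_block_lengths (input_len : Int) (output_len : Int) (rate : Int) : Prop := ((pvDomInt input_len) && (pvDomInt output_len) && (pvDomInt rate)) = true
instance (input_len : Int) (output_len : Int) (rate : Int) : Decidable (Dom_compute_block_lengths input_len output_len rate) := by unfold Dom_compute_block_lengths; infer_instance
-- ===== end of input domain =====

-- B replaces A's accumulating while-loop by direct arithmetic (first aligned block, then
-- divmod counting the full blocks and the remainder); objective: simpler. Equal return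
-- values proved on Pre_ (rate > 0, or rate < 0 with output_len ≤ 0; elsewhere A raises
-- or loops forever).

-- ===== PORT A =====
-- the while-loop of A, with fuel (outside Pre_ the Python loop may diverge; inside Pre_
-- the fuel is shown sufficient). State: remaining, cur_len, step_len, blocks (reversed).
def clbLoop (rate : Int) : Nat → Int → Int → Int → List Int → List Int
  | 0, _, _, _, blocks => blocks.reverse
  | fuel+1, remaining, cur_len, step_len, blocks =>
    if 0 < remaining then
      let block_len := min step_len remaining
      clbLoop rate fuel (remaining - block_len) (cur_len + block_len) rate (block_len :: blocks)
    else blocks.reverse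

def compute_block_lengths (input_len : Int) (output_len : Int) (rate : Int) : List Int :=
  let step_len := PySem.Int.mod (-input_len) rate
  let step_len := if step_len = 0 then rate else step_len
  clbLoop rate (output_len.toNat + 1) output_len input_len step_len []

-- ===== PORT B =====
def compute_block_lengths_alt (input_len : Int) (output_len : Int) (rate : Int) : List Int :=
  if output_len ≤ 0 then []
  else
    let m := PySem.Int.mod (-input_len) rate
    let first := if m = 0 then rate else m                       -- `… % rate or rate`
    if output_len ≤ first then [output_len]
    else
      let full := PySem.Int.floordiv (output_len - first) rate
      let rem := PySem.Int.mod (output_len - first) rate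
      first :: (List.replicate full.toNat rate ++ (if rem ≠ 0 then [rem] else []))

-- ===== PRECONDITION & SPEC =====
-- Pre_ excludes exactly the inputs where Python A does not return: rate = 0 raises
-- ZeroDivisionError, and rate < 0 with output_len > 0 loops forever.
def Pre_compute_block_lengths (input_len : Int) (output_len : Int) (rate : Int) : Prop :=
  0 < rate ∨ (rate ≠ 0 ∧ output_len ≤ 0)
instance (input_len : Int) (output_len : Int) (rate : Int) : Decidable (Pre_compute_block_lengths input_len output_len rate) := by unfold Pre_compute_block_lengths; infer_instance

def pvWitness_compute_block_lengths : Int × Int × Int := (3, 10, 4)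

def Spec_compute_block_lengths (input_len : Int) (output_len : Int) (rate : Int) (out : List Int) : Prop := out = compute_block_lengths_alt input_len output_len rate
instance (input_len : Int) (output_len : Int) (rate : Int) (out : List Int) : Decidable (Spec_compute_block_lengths input_len output_len rate out) := by unfold Spec_compute_block_lengths; infer_instance

-- ===== CLAIM (what is proved, stated in full; the proofs are below) =====
def Claim_equal_compute_block_lengths : Prop := ∀ (input_len : Int) (output_len : Int) (rate : Int), Dom_compute_block_lengths input_len output_len rate → Pre_compute_block_lengths input_len output_len rate → Spec_compute_block_lengths input_len output_len rate (compute_block_lengths input_len output_len rate)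


-- ===== LEMMAS AND PROOFS =====

-- the mathematical shape of A's loop after the first iteration: blocks of `r` then the remainder
def chain (r : Int) (m : Int) : List Int :=
  if h : 0 < r ∧ r < m then r :: chain r (m - r) else [m]
termination_by m.toNat
decreasing_by omega

theorem chain_closed (r : Int) (hr : 0 < r) : ∀ m : Int, 0 < m →
      chain r m =
        List.replicate (m / r).toNat r ++ (if m % r ≠ 0 then [m % r] else []) := by
  intro m
  induction m using chain.induct (r := r) with
  | case1 x h ih =>
    intro _
    obtain ⟨-, hlt⟩ := h
    rw [chain, dif_pos ⟨hr, hlt⟩, ih (by omega)]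
    have hdiv : x / r = (x - r) / r + 1 := by
      have := Int.add_mul_ediv_right (x - r) 1 (show r ≠ 0 by omega)
      simpa using this
    have hmod : x % r = (x - r) % r := (Int.sub_emod_right x r).symm
    have hnn : 0 ≤ (x - r) / r := Int.ediv_nonneg (by omega) (by omega)
    have htn : (x / r).toNat = ((x - r) / r).toNat + 1 := by omega
    rw [hmod, htn, List.replicate_succ]
    simp
  | case2 x h =>
    intro hm
    rw [chain, dif_neg h]
    have hle : x ≤ r := by omega
    by_cases he : x = r
    · subst he
      rw [Int.ediv_self (by omega), Int.emod_self]
      simp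
    · have hlt : x < r := by omega
      rw [Int.ediv_eq_zero_of_lt (by omega) hlt, Int.emod_eq_of_lt (by omega) hlt]
      simp [show x ≠ 0 by omega]

theorem clbLoop_eq (rate : Int) (hr : 0 < rate) :
    ∀ (fuel : Nat) (remaining cur step : Int) (blocks : List Int),
      1 ≤ step → remaining.toNat ≤ fuel →
      clbLoop rate fuel remaining cur step blocks =
        blocks.reverse ++
          (if remaining ≤ 0 then []
           else if remaining ≤ step then [remaining]
           else step :: chain rate (remaining - step)) := by
  intro fuel
  induction fuel with
  | zero =>
    intro remaining cur step blocks hs hf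
    have : remaining ≤ 0 := by omega
    simp [clbLoop, this]
  | succ n ih =>
    intro remaining cur step blocks hs hf
    by_cases hrem : 0 < remaining
    · have hpos : ¬ remaining ≤ 0 := by omega
      rw [clbLoop]
      simp only [hrem, if_true]
      by_cases hle : remaining ≤ step
      · have hmin : min step remaining = remaining := by omega
        rw [hmin]
        rw [ih (remaining - remaining) (cur + remaining) rate (remaining :: blocks) (by omega) (by omega)]
        simp [hpos, hle]
      · have hmin : min step remaining = step := by omega
        rw [hmin]
        rw [ih (remaining - step) (cur + step) rate (step :: blocks) (by omega) (by omega)]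
        have h1 : ¬ remaining - step ≤ 0 := by omega
        simp only [h1, if_false, hpos, hle]
        by_cases h2 : rate < remaining - step
        · rw [if_neg (show ¬ remaining - step ≤ rate by omega),
            show chain rate (remaining - step) = rate :: chain rate (remaining - step - rate) from by
              rw [chain, dif_pos ⟨hr, h2⟩]]
          simp
        · rw [if_pos (show remaining - step ≤ rate by omega),
            show chain rate (remaining - step) = [remaining - step] from by
              rw [chain, dif_neg (by rintro ⟨-, hc⟩; omega)]]
          simp
    · rw [clbLoop]
      simp [hrem, show remaining ≤ 0 by omega]

-- ===== VERDICT (by name: the statement is the Claim_ definition above) =====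
theorem compute_block_lengths_spec : Claim_equal_compute_block_lengths := by
  intro i o r _ hP
  unfold Spec_compute_block_lengths compute_block_lengths compute_block_lengths_alt
  rcases hP with hr | ⟨hr0, ho⟩
  · -- 0 < r
    simp only [PySem.Int.floordiv_eq_ediv_of_pos hr, PySem.Int.mod_eq_emod_of_pos hr]
    have hm0 : 0 ≤ (-i) % r := Int.emod_nonneg _ (by omega)
    have hm1 : (-i) % r < r := Int.emod_lt_of_pos _ hr
    set s : Int := if (-i) % r = 0 then r else (-i) % r with hs
    have hs1 : 1 ≤ s := by rw [hs]; split_ifs with h <;> omega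
    have hsr : s ≤ r := by rw [hs]; split_ifs with h <;> omega
    rw [clbLoop_eq r hr (o.toNat + 1) o i s [] hs1 (by omega)]
    simp only [List.reverse_nil, List.nil_append]
    by_cases h1 : o ≤ 0
    · simp [h1]
    · simp only [h1, if_false]
      by_cases h2 : o ≤ s
      · simp [h2]
      · simp only [h2, if_false]
        rw [chain_closed r hr (o - s) (by omega)]
  · -- rate ≠ 0, o ≤ 0
    have h1 : o.toNat = 0 := by omega
    rw [h1]
    simp [clbLoop, show ¬ (0:Int) < o by omega, show o ≤ 0 from ho]
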